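-- pv_equiv track=rewrite | github.com/Lummetry/ALLAN_LegeAI | endpoints/get_merge.py | update_actions
-- ===== SOURCE A (Python) =====
-- def update_actions(actions, current_action):
--     """ Update the rest of the action positions according to the current action. """
--
--     start_current = current_action[1]
--     end_current = current_action[2]
--
--     i = 0
--     while i < len(actions):
--         action = actions[i]
--         start = action[1]
--         end = action[2]
--
--         if current_action[0] == 'remove':
--
--             if min(start, start_current) <= max(end, end_current):
--                 # If the two actions intersect, drop the second one
--                 del actions[i]
--                 continue
--
--             # Update the sequence positions if they occur after the removed sequence
--             seq_len = end_current - start_current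
--             if start > end_current:
--                 start = start - seq_len
--             if end > end_current:
--                 end = end - seq_len
--
--
--             new_action = list(actions[i])
--             new_action[1] = start
--             new_action[2] = end
--             actions[i] = tuple(new_action)
--
--             i += 1
--
--         elif current_action[0] == 'replace':
--
--             # Update the sequence positions if they occur after the removed sequence
--             delta_len = len(current_action[3]) - (end_current - start_current)
--             if start > end_current:
--                 start = start + delta_len
--             if end > end_current:
--                 end = end + delta_len
--
--             new_action = list(actions[i])
--             new_action[1] = start
--             new_action[2] = end
--             actions[i] = tuple(new_action)
--
--             i += 1
--
--         else:
--             i += 1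
--
--     return actions
-- ===== SOURCE B (Python) =====
-- def update_actions(actions, current_action):
--     """ Update the rest of the action positions according to the current action.
--     Mutates `actions` in place (slice-assignment) like the original, and returns it. """
--
--     tag, start_current, end_current, payload = current_action
--
--     if tag == 'remove':
--         seq_len = end_current - start_current
--
--         def shift(a):
--             return (a[0],
--                     a[1] - seq_len if a[1] > end_current else a[1],
--                     a[2] - seq_len if a[2] > end_current else a[2],
--                     a[3])
--
--         new_list = [shift(a) for a in actions
--                     if min(a[1], start_current) > max(a[2], end_current)]
--     elif tag == 'replace':
--         delta_len = len(payload) - (end_current - start_current)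
--
--         def shift(a):
--             return (a[0],
--                     a[1] + delta_len if a[1] > end_current else a[1],
--                     a[2] + delta_len if a[2] > end_current else a[2],
--                     a[3])
--
--         new_list = [shift(a) for a in actions]
--     else:
--         return actions
--
--     actions[:] = new_list
--     return actions
-- ===== Notes on version B (the rewrite author's own statement) =====
-- stated objective: simpler
-- what changed: B switches on the action tag once outside the loop and builds the result as a single filter+map comprehension (slice-assigned back for in-place mutation), instead of A's index-managed while loop with in-loop del/continue and per-element tuple rebuild.
import Mathlib
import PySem

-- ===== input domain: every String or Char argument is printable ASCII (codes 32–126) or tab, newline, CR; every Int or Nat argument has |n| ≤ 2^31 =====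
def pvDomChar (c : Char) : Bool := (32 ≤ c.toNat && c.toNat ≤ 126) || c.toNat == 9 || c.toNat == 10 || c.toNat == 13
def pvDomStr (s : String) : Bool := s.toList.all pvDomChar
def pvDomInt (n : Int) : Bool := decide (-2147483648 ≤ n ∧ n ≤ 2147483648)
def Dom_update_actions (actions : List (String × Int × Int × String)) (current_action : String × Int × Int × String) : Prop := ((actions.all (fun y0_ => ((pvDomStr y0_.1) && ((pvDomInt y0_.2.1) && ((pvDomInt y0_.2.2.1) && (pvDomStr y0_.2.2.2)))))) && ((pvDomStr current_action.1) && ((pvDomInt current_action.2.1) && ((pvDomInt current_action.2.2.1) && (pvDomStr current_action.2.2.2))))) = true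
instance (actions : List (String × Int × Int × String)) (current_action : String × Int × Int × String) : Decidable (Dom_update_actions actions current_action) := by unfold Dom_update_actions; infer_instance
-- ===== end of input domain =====

-- B replaces A's index-managed while loop (with in-loop del/continue) by a single tag switch
-- and one filter+map pass; equal return value — both Pythons mutate `actions` in place alike.


-- ===== PORT A =====
-- A's while loop with index i and in-loop `del actions[i]`/`continue`, transcribed as
-- recursion on the unprocessed suffix `rest` with the processed prefix `done` accumulated
-- (i = done.length; `del actions[i]` drops the head of rest, `i += 1` moves it to done).
def pvLoopA (current_action : String × Int × Int × String)
    (done rest : List (String × Int × Int × String)) : List (String × Int × Int × String) :=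
  match rest with
  | [] => done
  | action :: rest' =>
    let start := action.2.1
    let end_ := action.2.2.1
    if current_action.1 == "remove" then
      if min start current_action.2.1 ≤ max end_ current_action.2.2.1 then
        -- del actions[i]; continue
        pvLoopA current_action done rest'
      else
        let seq_len := current_action.2.2.1 - current_action.2.1
        let start' := if start > current_action.2.2.1 then start - seq_len else start
        let end' := if end_ > current_action.2.2.1 then end_ - seq_len else end_
        pvLoopA current_action (done ++ [(action.1, start', end', action.2.2.2)]) rest'
    else if current_action.1 == "replace" then
      let delta_len := PySem.Str.len current_action.2.2.2 - (current_action.2.2.1 - current_action.2.1)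
      let start' := if start > current_action.2.2.1 then start + delta_len else start
      let end' := if end_ > current_action.2.2.1 then end_ + delta_len else end_
      pvLoopA current_action (done ++ [(action.1, start', end', action.2.2.2)]) rest'
    else
      pvLoopA current_action (done ++ [action]) rest'

def update_actions (actions : List (String × Int × Int × String)) (current_action : String × Int × Int × String) : List (String × Int × Int × String) :=
  pvLoopA current_action [] actions

-- ===== PORT B =====
def pvShiftRemove (end_current seq_len : Int) (a : String × Int × Int × String) : String × Int × Int × String :=
  (a.1, if a.2.1 > end_current then a.2.1 - seq_len else a.2.1,
        if a.2.2.1 > end_current then a.2.2.1 - seq_len else a.2.2.1, a.2.2.2)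

def pvShiftReplace (end_current delta_len : Int) (a : String × Int × Int × String) : String × Int × Int × String :=
  (a.1, if a.2.1 > end_current then a.2.1 + delta_len else a.2.1,
        if a.2.2.1 > end_current then a.2.2.1 + delta_len else a.2.2.1, a.2.2.2)

def update_actions_alt (actions : List (String × Int × Int × String)) (current_action : String × Int × Int × String) : List (String × Int × Int × String) :=
  let start_current := current_action.2.1
  let end_current := current_action.2.2.1
  if current_action.1 == "remove" then
    let seq_len := end_current - start_current
    (actions.filter (fun a => max a.2.2.1 end_current < min a.2.1 start_current)).map
      (pvShiftRemove end_current seq_len)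
  else if current_action.1 == "replace" then
    let delta_len := PySem.Str.len current_action.2.2.2 - (end_current - start_current)
    actions.map (pvShiftReplace end_current delta_len)
  else
    actions

-- ===== PRECONDITION & SPEC =====
def Spec_update_actions (actions : List (String × Int × Int × String)) (current_action : String × Int × Int × String) (out : List (String × Int × Int × String)) : Prop := out = update_actions_alt actions current_action
instance (actions : List (String × Int × Int × String)) (current_action : String × Int × Int × String) (out : List (String × Int × Int × String)) : Decidable (Spec_update_actions actions current_action out) := by unfold Spec_update_actions; infer_instance

-- ===== CLAIM =====
def Claim_equal_update_actions : Prop := ∀ (actions : List (String × Int × Int × String)) (current_action : String × Int × Int × String), Dom_update_actions actions current_action → Spec_update_actions actions current_action (update_actions actions current_action)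

-- ===== LEMMAS AND PROOFS =====
theorem pvLoopA_eq (current_action : String × Int × Int × String)
    (rest : List (String × Int × Int × String)) :
    ∀ done, pvLoopA current_action done rest = done ++ update_actions_alt rest current_action := by
  induction rest with
  | nil =>
    intro done
    simp [pvLoopA, update_actions_alt]
  | cons a rest ih =>
    intro done
    by_cases hr : current_action.1 == "remove"
    · by_cases hcap : min a.2.1 current_action.2.1 ≤ max a.2.2.1 current_action.2.2.1
      · simp only [pvLoopA, hr, hcap, if_true, ih]
        simp [update_actions_alt, hr, List.filter_cons]
        rw [if_neg (by omega)]
      · simp only [pvLoopA, hr, hcap, if_false, ih]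
        simp [update_actions_alt, hr, List.filter_cons]
        have hc : (a.2.2.1 < a.2.1 ∧ current_action.2.2.1 < a.2.1) ∧
            a.2.2.1 < current_action.2.1 ∧ current_action.2.2.1 < current_action.2.1 := by omega
        rw [if_pos hc]
        simp [pvShiftRemove, hc.1.2]
    · by_cases hp : current_action.1 == "replace"
      · simp only [pvLoopA, hr, hp, ih]
        simp [update_actions_alt, hr, hp, pvShiftReplace]
      · simp only [pvLoopA, hr, hp, ih]
        simp [update_actions_alt, hr, hp]

-- ===== VERDICT =====
theorem update_actions_spec : Claim_equal_update_actions := by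
  intro actions current_action _
  unfold Spec_update_actions update_actions
  simpa using pvLoopA_eq current_action actions []
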